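-- pv_equiv track=rewrite | github.com/AegonnI/AI-assistant | pdf_parser_module/pdf_to_text_extractor_main.py | _looks_like_table_row
-- ===== SOURCE A (Python) =====
-- def _looks_like_table_row(line: str) -> bool:
--     """Проверяет, похожа ли строка на строку таблицы"""
--     if not line.strip():
--         return False
--
--     # Удаляем разделители
--     cleaned = line.replace('|', ' ').replace('-', ' ').replace('=', ' ').strip()
--
--     if not cleaned:
--         return False
--
--     # Проверяем состав символов
--     # Разрешены: цифры, пробелы, запятые, точки, скобки, минус
--     allowed = set('0123456789 .,()-')
--
--     for char in cleaned:
--         if char not in allowed: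
--             return False
--
--     # Должно быть хотя бы одно число
--     return any(c.isdigit() for c in cleaned)
-- ===== SOURCE B (Python) =====
-- def _looks_like_table_row(line: str) -> bool:
--     # Clean exactly as the original, then decide by counting occurrences of each
--     # alphabet character ('-' cannot survive the replacements, so it is not counted):
--     # the line is a table row iff digit occurrences are positive and digit + filler
--     # occurrences account for every character of the cleaned line.
--     cleaned = line.replace('|', ' ').replace('-', ' ').replace('=', ' ').strip()
--     if not cleaned:
--         return False
--     digits = sum(cleaned.count(ch) for ch in '0123456789')
--     fillers = sum(cleaned.count(ch) for ch in ' .,()')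
--     return digits > 0 and digits + fillers == len(cleaned)
-- ===== Notes on version B (the rewrite author's own statement) =====
-- stated objective: alternative
-- what changed: Replaced A's per-character allowed-set loop and digit generator over the string by a loop over the fixed alphabet: sum cleaned.count(ch) for the digit and filler characters and decide arithmetically (digit count > 0 and digit+filler counts equal the cleaned length).
import Mathlib
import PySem

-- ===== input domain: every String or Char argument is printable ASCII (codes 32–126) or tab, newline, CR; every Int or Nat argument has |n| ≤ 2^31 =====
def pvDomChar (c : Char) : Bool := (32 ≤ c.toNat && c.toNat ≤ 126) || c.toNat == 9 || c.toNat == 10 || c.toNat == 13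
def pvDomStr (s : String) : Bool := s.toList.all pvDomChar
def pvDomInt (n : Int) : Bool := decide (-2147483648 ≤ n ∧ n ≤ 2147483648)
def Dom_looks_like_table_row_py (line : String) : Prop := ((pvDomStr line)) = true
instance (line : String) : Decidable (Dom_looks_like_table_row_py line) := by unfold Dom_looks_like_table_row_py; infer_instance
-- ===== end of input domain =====

-- B replaces A's per-character allowed-set loop and digit generator by a loop over the
-- fixed alphabet: it sums cleaned.count(ch) for the digit and the filler characters and
-- decides arithmetically (digit count > 0 and digit+filler counts equal the length).

-- ===== PORT A =====
-- A's `allowed = set('0123456789 .,()-')`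
def pvAllowedA : PySem.Set Char := PySem.Set.ofList "0123456789 .,()-".toList

-- A's `for char in cleaned: if char not in allowed: return False` (true = fell through)
def pvScanAllowed : List Char → Bool
  | [] => true
  | c :: rest => if pvAllowedA.contains c then pvScanAllowed rest else false

def looks_like_table_row_py (line : String) : Bool :=
  if (PySem.Str.strip line).toList = [] then false
  else
    let cleaned := PySem.Str.strip (PySem.Str.replace (PySem.Str.replace
      (PySem.Str.replace line "|" " ") "-" " ") "=" " ")
    if cleaned.toList = [] then false
    else if pvScanAllowed cleaned.toList then
      cleaned.toList.any PySem.Chars.isdigit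
    else false

-- ===== PORT B =====
-- Source B's `sum(cleaned.count(ch) for ch in alpha)`
def pvSumCounts (cleaned : String) (alpha : List Char) : Nat :=
  alpha.foldl (fun acc ch => acc + PySem.Str.count cleaned (String.ofList [ch])) 0

def looks_like_table_row_py_alt (line : String) : Bool :=
  let cleaned := PySem.Str.strip (PySem.Str.replace (PySem.Str.replace
    (PySem.Str.replace line "|" " ") "-" " ") "=" " ")
  if cleaned.toList = [] then false
  else
    let digits := pvSumCounts cleaned "0123456789".toList
    let fillers := pvSumCounts cleaned " .,()".toList
    decide (0 < digits) && decide (digits + fillers = cleaned.toList.length)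

-- ===== PRECONDITION & SPEC =====
def Spec_looks_like_table_row_py (line : String) (out : Bool) : Prop := out = looks_like_table_row_py_alt line
instance (line : String) (out : Bool) : Decidable (Spec_looks_like_table_row_py line out) := by unfold Spec_looks_like_table_row_py; infer_instance

-- ===== CLAIM (what is proved, stated in full; the proofs are below) =====
def Claim_equal_looks_like_table_row_py : Prop := ∀ (line : String), Dom_looks_like_table_row_py line → Spec_looks_like_table_row_py line (looks_like_table_row_py line)

-- ===== LEMMAS AND PROOFS =====

lemma pv_go_single (a b : Char) : ∀ (fuel : Nat) (l acc : List Char), l.length ≤ fuel →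
    PySem.Chars.replace.go [a] [b] fuel l acc = acc.reverse ++ l.map (fun c => if c = a then b else c) := by
  intro fuel
  induction fuel with
  | zero => intro l acc h; simp at h; subst h; simp [PySem.Chars.replace.go]
  | succ n ih =>
    intro l acc h
    match l with
    | [] => simp [PySem.Chars.replace.go]
    | c :: t =>
      simp only [PySem.Chars.replace.go]
      by_cases hc : c = a
      · subst hc
        simp [List.isPrefixOf, ih t _ (by simpa using h)]
      · have : [a].isPrefixOf (c :: t) = false := by
          simp [List.isPrefixOf, Ne.symm hc]
        simp [this, hc, ih t _ (by simpa using h)]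

-- single-character str.replace is a character map
lemma pv_replace_single (l : List Char) (a b : Char) :
    PySem.Chars.replace l [a] [b] = l.map (fun c => if c = a then b else c) := by
  simp [PySem.Chars.replace, pv_go_single a b l.length l [] le_rfl]

-- single-character str.count is List.count
lemma pv_count_go_single (c : Char) : ∀ (fuel : Nat) (l : List Char) (acc : Nat),
    l.length ≤ fuel → PySem.Chars.count.go [c] fuel l acc = acc + l.count c := by
  intro fuel
  induction fuel with
  | zero => intro l acc h; simp at h; subst h; simp [PySem.Chars.count.go]
  | succ n ih =>
    intro l acc h
    match l with
    | [] => simp [PySem.Chars.count.go]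
    | a :: t =>
      by_cases hc : a = c
      · subst hc
        have hstep : PySem.Chars.count.go [a] (n+1) (a :: t) acc
            = PySem.Chars.count.go [a] n t (acc + 1) := by
          simp [PySem.Chars.count.go, List.isPrefixOf]
        rw [hstep, ih t _ (by simpa using h), List.count_cons]
        simp
        omega
      · have hstep : PySem.Chars.count.go [c] (n+1) (a :: t) acc
            = PySem.Chars.count.go [c] n t acc := by
          simp [PySem.Chars.count.go, List.isPrefixOf, Ne.symm hc]
        rw [hstep, ih t _ (by simpa using h)]
        simp [List.count_cons, hc]

lemma pv_count_single (l : List Char) (c : Char) :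
    PySem.Chars.count l [c] = l.count c := by
  simp [PySem.Chars.count, pv_count_go_single c l.length l 0 le_rfl]

-- Source B's alphabet sum is a sum of List.counts
lemma pv_sumCounts_eq (cleaned : String) (alpha : List Char) :
    pvSumCounts cleaned alpha = (alpha.map (fun ch => cleaned.toList.count ch)).sum := by
  unfold pvSumCounts
  have h : ∀ (S : List Char) (a : Nat),
      S.foldl (fun acc ch => acc + PySem.Str.count cleaned (String.ofList [ch])) a
        = a + (S.map (fun ch => cleaned.toList.count ch)).sum := by
    intro S
    induction S with
    | nil => intro a; simp
    | cons ch t ih =>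
      intro a
      simp only [List.foldl_cons, List.map_cons, List.sum_cons, ih]
      have : PySem.Str.count cleaned (String.ofList [ch]) = cleaned.toList.count ch := by
        simp [PySem.Str.count, pv_count_single, String.toList_ofList]
      rw [this]; omega
  simpa using h alpha 0

-- disjoint countPs add up
lemma pv_countP_disjoint (p q : Char → Bool) (h : ∀ c, ¬(p c = true ∧ q c = true)) :
    ∀ (l : List Char), l.countP p + l.countP q = l.countP (fun c => p c || q c) := by
  intro l
  induction l with
  | nil => simp
  | cons a l ih =>
    rw [List.countP_cons, List.countP_cons, List.countP_cons]
    by_cases hp : p a = true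
    · have hq : q a = false := by
        cases hq : q a
        · rfl
        · exact absurd ⟨hp, hq⟩ (h a)
      simp [hp, hq, ← ih]
      omega
    · simp only [Bool.not_eq_true] at hp
      by_cases hq : q a = true
      · simp [hp, hq, ← ih]
        omega
      · simp only [Bool.not_eq_true] at hq
        simp [hp, hq, ← ih]

-- a sum of counts over a duplicate-free alphabet is a countP
lemma pv_sum_count_eq_countP (cl : List Char) : ∀ (S : List Char), S.Nodup →
    (S.map (fun ch => cl.count ch)).sum = cl.countP (fun c => S.contains c) := by
  intro S
  induction S with
  | nil =>
    intro _
    rw [List.map_nil, List.sum_nil]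
    symm
    apply List.countP_eq_zero.mpr
    intro c _
    simp
  | cons ch t ih =>
    intro hnd
    rcases List.nodup_cons.mp hnd with ⟨hch, hnt⟩
    simp only [List.map_cons, List.sum_cons, ih hnt]
    have hdis : ∀ c, ¬((c == ch) = true ∧ t.contains c = true) := by
      intro c ⟨h1, h2⟩
      simp only [beq_iff_eq] at h1
      simp only [List.contains_eq_mem, decide_eq_true_eq] at h2
      exact hch (h1 ▸ h2)
    have hd := pv_countP_disjoint (fun c => c == ch) (fun c => t.contains c) hdis cl
    have hcnt : cl.count ch = cl.countP (fun c => c == ch) := by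
      simp [List.count]
    have hcongr : cl.countP (fun c => (c == ch) || t.contains c)
        = cl.countP (fun c => (ch :: t).contains c) := by
      apply List.countP_congr
      intro c _
      simp [List.contains_eq_mem]
    rw [hcnt, hd, hcongr]

lemma pv_char_eq_iff (c d : Char) : (c = d) ↔ c.toNat = d.toNat :=
  ⟨fun h => h ▸ rfl, fun h => Char.ext (UInt32.toNat_inj.mp h)⟩

lemma pv_char_le_iff (c d : Char) : (c ≤ d) ↔ c.toNat ≤ d.toNat := by
  rw [Char.le_def, UInt32.le_iff_toNat_le]; rfl

lemma pv_isdigit_mem (c : Char) :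
    PySem.Chars.isdigit c = (['0','1','2','3','4','5','6','7','8','9'].contains c) := by
  rw [Bool.eq_iff_iff]
  simp only [PySem.Chars.isdigit, Bool.and_eq_true, decide_eq_true_eq, List.contains_eq_mem,
    List.mem_cons, List.not_mem_nil, or_false, pv_char_le_iff, pv_char_eq_iff]
  simp only [show ('0':Char).toNat = 48 from rfl, show ('9':Char).toNat = 57 from rfl,
    show ('1':Char).toNat = 49 from rfl, show ('2':Char).toNat = 50 from rfl,
    show ('3':Char).toNat = 51 from rfl, show ('4':Char).toNat = 52 from rfl,
    show ('5':Char).toNat = 53 from rfl, show ('6':Char).toNat = 54 from rfl,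
    show ('7':Char).toNat = 55 from rfl, show ('8':Char).toNat = 56 from rfl]
  omega

lemma pv_mem_strip {c : Char} {ls : List Char} (h : c ∈ PySem.Chars.strip ls) : c ∈ ls := by
  simp only [PySem.Chars.strip, PySem.Chars.rstrip, PySem.Chars.lstrip, List.mem_reverse] at h
  have h1 := (List.dropWhile_sublist _).subset h
  simp only [List.mem_reverse] at h1
  exact (List.dropWhile_sublist _).subset h1

lemma pv_strip_eq_nil_iff (ls : List Char) :
    PySem.Chars.strip ls = [] ↔ ∀ c ∈ ls, PySem.Chars.isspace c := by
  constructor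
  · intro h c hc
    by_contra hs
    simp only [PySem.Chars.strip, PySem.Chars.rstrip, PySem.Chars.lstrip,
      List.reverse_eq_nil_iff, List.dropWhile_eq_nil_iff, List.mem_reverse] at h
    by_cases hd : c ∈ List.dropWhile PySem.Chars.isspace ls
    · exact hs (h c hd)
    · have : c ∈ List.takeWhile PySem.Chars.isspace ls := by
        have := List.takeWhile_append_dropWhile (p := PySem.Chars.isspace) (l := ls)
        rw [← this] at hc
        rcases List.mem_append.mp hc with h' | h'
        · exact h'
        · exact absurd h' hd
      exact hs (List.mem_takeWhile_imp this)
  · intro h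
    simp only [PySem.Chars.strip, PySem.Chars.rstrip, PySem.Chars.lstrip,
      List.reverse_eq_nil_iff, List.dropWhile_eq_nil_iff, List.mem_reverse]
    intro c hc
    exact h c ((List.dropWhile_sublist _).subset hc)

lemma pv_scan_eq_all (cl : List Char) :
    pvScanAllowed cl = cl.all (fun c => pvAllowedA.contains c) := by
  induction cl with
  | nil => rfl
  | cons c t ih => by_cases h : pvAllowedA.contains c <;> simp [pvScanAllowed, h, ih]

lemma pv_toList_cleaned (line : String) :
    (PySem.Str.strip (PySem.Str.replace (PySem.Str.replace
      (PySem.Str.replace line "|" " ") "-" " ") "=" " ")).toList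
    = PySem.Chars.strip (((line.toList.map (fun c => if c = '|' then ' ' else c)).map
        (fun c => if c = '-' then ' ' else c)).map (fun c => if c = '=' then ' ' else c)) := by
  simp [PySem.Str.toList_strip, PySem.Str.toList_replace, pv_replace_single,
    show ("|" : String).toList = ['|'] from rfl, show ("-" : String).toList = ['-'] from rfl,
    show ("=" : String).toList = ['='] from rfl, show (" " : String).toList = [' '] from rfl]

-- the cleaned line never contains '-'
lemma pv_no_dash (line : String) (c : Char)
    (hc : c ∈ (PySem.Str.strip (PySem.Str.replace (PySem.Str.replace
      (PySem.Str.replace line "|" " ") "-" " ") "=" " ")).toList) : c ≠ '-' := by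
  rw [pv_toList_cleaned] at hc
  have h1 := pv_mem_strip hc
  simp only [List.mem_map] at h1
  obtain ⟨b, ⟨a, _, ha⟩, hb⟩ := h1
  intro h
  subst h
  have hb' : b = '-' := by
    by_cases h2 : b = '='
    · simp [h2] at hb
    · simpa [h2] using hb
  subst hb'
  by_cases h3 : a = '-' <;> simp [h3] at ha

-- if the whole line is whitespace, the cleaned line is empty
lemma pv_cleaned_nil_of_strip_nil (line : String)
    (h : (PySem.Str.strip line).toList = []) :
    (PySem.Str.strip (PySem.Str.replace (PySem.Str.replace
      (PySem.Str.replace line "|" " ") "-" " ") "=" " ")).toList = [] := by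
  rw [pv_toList_cleaned]
  rw [PySem.Str.toList_strip] at h
  rw [pv_strip_eq_nil_iff] at h ⊢
  intro c hc
  simp only [List.mem_map] at hc
  obtain ⟨b, ⟨a, ⟨x, hx, hxa⟩, ha⟩, hb⟩ := hc
  have hs := h x hx
  have hax : a = x := by
    by_cases h1 : x = '|'
    · subst h1; exact absurd hs (by decide)
    · simpa [h1] using hxa.symm
  subst hax
  have hba : b = a := by
    by_cases h1 : a = '-'
    · subst h1; exact absurd hs (by decide)
    · simpa [h1] using ha.symm
  subst hba
  have hcb : c = b := by
    by_cases h1 : b = '='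
    · subst h1; exact absurd hs (by decide)
    · simpa [h1] using hb.symm
  subst hcb
  exact hs

-- the main argument on a nonempty, dash-free cleaned character list
lemma pv_core (cl : List Char) (hm : '-' ∉ cl) :
    (if pvScanAllowed cl then cl.any PySem.Chars.isdigit else false)
      = (decide (0 < (("0123456789".toList.map (fun ch => cl.count ch)).sum))
          && decide ((("0123456789".toList.map (fun ch => cl.count ch)).sum
              + ((" .,()".toList.map (fun ch => cl.count ch)).sum)) = cl.length)) := by
  have hdig : (("0123456789".toList.map (fun ch => cl.count ch)).sum)
      = cl.countP (fun c => ("0123456789".toList).contains c) :=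
    pv_sum_count_eq_countP cl _ (by decide)
  have hfil : ((" .,()".toList.map (fun ch => cl.count ch)).sum)
      = cl.countP (fun c => (" .,()".toList).contains c) :=
    pv_sum_count_eq_countP cl _ (by decide)
  have hdisj : ∀ c, ¬((("0123456789".toList).contains c = true)
      ∧ ((" .,()".toList).contains c = true)) := by
    intro c ⟨h1, h2⟩
    simp only [List.contains_eq_mem, decide_eq_true_eq,
      show ("0123456789" : String).toList = ['0','1','2','3','4','5','6','7','8','9'] from rfl,
      show (" .,()" : String).toList = [' ','.',',','(',')'] from rfl,
      List.mem_cons, List.not_mem_nil, or_false] at h1 h2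
    rcases h1 with h1|h1|h1|h1|h1|h1|h1|h1|h1|h1 <;> subst h1 <;> simp at h2
  rw [hdig, hfil, pv_countP_disjoint _ _ hdisj cl]
  rw [Bool.eq_iff_iff]
  simp only [Bool.and_eq_true, decide_eq_true_eq]
  constructor
  · intro h
    split_ifs at h with hs
    · -- A true: all allowed and some digit
      rw [pv_scan_eq_all] at hs
      simp only [List.all_eq_true] at hs
      simp only [List.any_eq_true, pv_isdigit_mem] at h
      obtain ⟨d, hd, hdig'⟩ := h
      constructor
      · apply List.countP_pos_iff.mpr
        exact ⟨d, hd, by simpa using hdig'⟩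
      · apply List.countP_eq_length.mpr
        intro c hc
        have hall := hs c hc
        have hnd : c ≠ '-' := fun he => hm (he ▸ hc)
        revert hall
        simp only [pvAllowedA, PySem.Set.contains, List.contains_eq_mem, decide_eq_true_eq,
          PySem.Set.mem_ofList, Bool.or_eq_true,
          show ("0123456789 .,()-" : String).toList
            = ['0','1','2','3','4','5','6','7','8','9',' ','.',',','(',')','-'] from rfl,
          show ("0123456789" : String).toList = ['0','1','2','3','4','5','6','7','8','9'] from rfl,
          show (" .,()" : String).toList = [' ','.',',','(',')'] from rfl,
          List.mem_cons, List.not_mem_nil, or_false]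
        intro hall
        rcases hall with h|h|h|h|h|h|h|h|h|h|h|h|h|h|h|h <;>
          first
          | (subst h; decide)
          | exact absurd h hnd
  · rintro ⟨hpos, hlen⟩
    have hall : ∀ c ∈ cl, pvAllowedA.contains c = true := by
      intro c hc
      have := List.countP_eq_length.mp hlen c hc
      revert this
      simp only [pvAllowedA, PySem.Set.contains, List.contains_eq_mem, decide_eq_true_eq,
        PySem.Set.mem_ofList, Bool.or_eq_true,
        show ("0123456789 .,()-" : String).toList
          = ['0','1','2','3','4','5','6','7','8','9',' ','.',',','(',')','-'] from rfl,
        show ("0123456789" : String).toList = ['0','1','2','3','4','5','6','7','8','9'] from rfl,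
        show (" .,()" : String).toList = [' ','.',',','(',')'] from rfl,
        List.mem_cons, List.not_mem_nil, or_false]
      intro hmem
      rcases hmem with (h|h|h|h|h|h|h|h|h|h)|(h|h|h|h|h) <;> (subst h; decide)
    have hs : pvScanAllowed cl = true := by
      rw [pv_scan_eq_all]; simpa using hall
    rw [if_pos hs]
    obtain ⟨d, hd, hdd⟩ := List.countP_pos_iff.mp hpos
    simp only [List.any_eq_true, pv_isdigit_mem]
    exact ⟨d, hd, by simpa using hdd⟩

lemma pv_main (line : String) :
    looks_like_table_row_py line = looks_like_table_row_py_alt line := by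
  unfold looks_like_table_row_py looks_like_table_row_py_alt
  by_cases h0 : (PySem.Str.strip line).toList = []
  · have hc := pv_cleaned_nil_of_strip_nil line h0
    simp only [h0, if_true, hc, if_true]
  · simp only [h0, if_false]
    by_cases h1 : (PySem.Str.strip (PySem.Str.replace (PySem.Str.replace
        (PySem.Str.replace line "|" " ") "-" " ") "=" " ")).toList = []
    · simp only [h1, if_true]
    · simp only [h1, if_false]
      have hm : '-' ∉ (PySem.Str.strip (PySem.Str.replace (PySem.Str.replace
          (PySem.Str.replace line "|" " ") "-" " ") "=" " ")).toList :=
        fun hmem => pv_no_dash line '-' hmem rfl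
      simp only [pv_sumCounts_eq]
      exact pv_core _ hm

-- ===== VERDICT (by name: the statement is the Claim_ definition above) =====
theorem looks_like_table_row_py_spec : Claim_equal_looks_like_table_row_py := by
  intro line _
  unfold Spec_looks_like_table_row_py
  exact pv_main line
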